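-- pv_equiv track=rewrite | github.com/stanford-oval/storm | src/modules/utils.py | limit_word_count_preserve_newline
-- ===== SOURCE A (Python) =====
-- def limit_word_count_preserve_newline(input_string, max_word_count):
--     """Limit the word count of a string while preserving complete lines."""
--
--     word_count = 0
--     limited_string = ''
--
--     for word in input_string.split('\n'):
--         line_words = word.split()
--         for lw in line_words:
--             if word_count < max_word_count:
--                 limited_string += lw + ' '
--                 word_count += 1
--             else:
--                 break
--         if word_count >= max_word_count:
--             break
--         limited_string = limited_string.strip() + '\n'
--
--     return limited_string.strip()
-- ===== SOURCE B (Python) =====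
-- def limit_word_count_preserve_newline(input_string, max_word_count):
--     """Limit the word count of a string while preserving complete lines."""
--     remaining = max_word_count
--     out_lines = []
--     for line in input_string.split('\n'):
--         if remaining <= 0:
--             break
--         words = line.split()
--         if not words:
--             continue
--         take = words[:remaining]
--         out_lines.append(' '.join(take))
--         remaining -= len(take)
--         if len(take) < len(words):
--             break
--     return '\n'.join(out_lines)
-- ===== Notes on version B (the rewrite author's own statement) =====
-- stated objective: faster
-- what changed: B replaces A's running string that is re-stripped and re-concatenated after every line by a single pass that keeps a remaining-word budget, collects one already-clean group per non-blank line, and joins them once at the end.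
import Mathlib
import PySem

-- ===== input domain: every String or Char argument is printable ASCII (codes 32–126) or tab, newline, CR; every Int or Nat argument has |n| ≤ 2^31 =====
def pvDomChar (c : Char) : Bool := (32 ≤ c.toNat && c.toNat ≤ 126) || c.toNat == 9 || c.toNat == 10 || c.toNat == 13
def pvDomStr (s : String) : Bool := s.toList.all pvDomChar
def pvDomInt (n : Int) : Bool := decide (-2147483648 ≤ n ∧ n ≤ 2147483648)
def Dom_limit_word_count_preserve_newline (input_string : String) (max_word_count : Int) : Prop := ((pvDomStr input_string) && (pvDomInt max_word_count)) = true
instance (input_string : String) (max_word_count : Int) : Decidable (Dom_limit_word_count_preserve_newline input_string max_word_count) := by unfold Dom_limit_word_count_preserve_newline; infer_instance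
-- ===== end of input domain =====

-- B keeps a remaining-word budget and joins per-line groups once at the end, instead of A's
-- repeated strip-and-concatenate of the whole accumulated string after every line (objective: faster).

-- ===== PORT A =====
-- inner loop 'for lw in line_words: if word_count < max_word_count: … else: break'
def pvAInner (maxw : Int) : List (List Char) → Int → List Char → Int × List Char
  | [], wc, acc => (wc, acc)
  | lw :: rest, wc, acc =>
    if wc < maxw then pvAInner maxw rest (wc + 1) (acc ++ lw ++ [' '])
    else (wc, acc)

-- outer loop 'for word in input_string.split('\n')' with the break on word_count ≥ max_word_count
def pvALoop (maxw : Int) : List (List Char) → Int → List Char → List Char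
  | [], _, acc => acc
  | line :: rest, wc, acc =>
    let p := pvAInner maxw (PySem.Chars.split₀ line) wc acc
    if maxw ≤ p.1 then p.2
    else pvALoop maxw rest p.1 (PySem.Chars.strip p.2 ++ ['\n'])

def limit_word_count_preserve_newline (input_string : String) (max_word_count : Int) : String :=
  String.mk (PySem.Chars.strip
    (pvALoop max_word_count (PySem.Chars.splitOn input_string.toList ['\n']) 0 []))

-- ===== PORT B =====
-- the for-loop of Source B: builds the list of output lines; 'break' ends the recursion, 'continue' skips
def pvBLoop : Int → List (List Char) → List (List Char)
  | _, [] => []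
  | remaining, line :: rest =>
    if remaining ≤ 0 then []
    else
      let words := PySem.Chars.split₀ line
      if words.isEmpty then pvBLoop remaining rest
      else
        let take := PySem.List.slice words none (some remaining)
        if take.length < words.length then [PySem.Chars.join [' '] take]
        else PySem.Chars.join [' '] take :: pvBLoop (remaining - (take.length : Int)) rest

def limit_word_count_preserve_newline_alt (input_string : String) (max_word_count : Int) : String :=
  String.mk (PySem.Chars.join ['\n']
    (pvBLoop max_word_count (PySem.Chars.splitOn input_string.toList ['\n'])))

-- ===== PRECONDITION & SPEC =====
def Spec_limit_word_count_preserve_newline (input_string : String) (max_word_count : Int) (out : String) : Prop := out = limit_word_count_preserve_newline_alt input_string max_word_count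
instance (input_string : String) (max_word_count : Int) (out : String) : Decidable (Spec_limit_word_count_preserve_newline input_string max_word_count out) := by unfold Spec_limit_word_count_preserve_newline; infer_instance

-- ===== CLAIM (what is proved, stated in full; the proofs are below) =====
def Claim_equal_limit_word_count_preserve_newline : Prop := ∀ (input_string : String) (max_word_count : Int), Dom_limit_word_count_preserve_newline input_string max_word_count → Spec_limit_word_count_preserve_newline input_string max_word_count (limit_word_count_preserve_newline input_string max_word_count)

-- ===== LEMMAS AND PROOFS =====

-- a word produced by split(): nonempty, no whitespace characters
def pvGoodW (w : List Char) : Prop := w ≠ [] ∧ ∀ c ∈ w, PySem.Chars.isspace c = false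
-- a finished output group/string: nonempty and invariant under lstrip and rstrip
def pvClean (g : List Char) : Prop :=
  PySem.Chars.lstrip g = g ∧ PySem.Chars.rstrip g = g ∧ g ≠ []

lemma pv_dropWhile_keep {p : Char → Bool} {a b : List Char}
    (h : List.dropWhile p a = a) (hne : a ≠ []) :
    List.dropWhile p (a ++ b) = a ++ b := by
  rw [List.dropWhile_append, h]
  simp [List.isEmpty_iff, hne]

lemma pv_dropWhile_skip {p : Char → Bool} {a b : List Char}
    (h : ∀ c ∈ a, p c = true) :
    List.dropWhile p (a ++ b) = List.dropWhile p b := by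
  rw [List.dropWhile_append]
  have : List.dropWhile p a = [] := List.dropWhile_eq_nil_iff.2 (by intro x hx; exact h x hx)
  simp [this]

lemma pv_lstrip_clean_append {a b : List Char} (h : pvClean a) :
    PySem.Chars.lstrip (a ++ b) = a ++ b := by
  have h1 := h.1
  simp only [PySem.Chars.lstrip] at h1 ⊢
  exact pv_dropWhile_keep h1 h.2.2

lemma pv_rstrip_clean_append {a b : List Char} (h : pvClean b) :
    PySem.Chars.rstrip (a ++ b) = a ++ b := by
  have h1 : List.dropWhile PySem.Chars.isspace b.reverse = b.reverse := by
    have := h.2.1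
    simp only [PySem.Chars.rstrip] at this
    have := congrArg List.reverse this
    simpa using this
  simp only [PySem.Chars.rstrip, List.reverse_append]
  rw [pv_dropWhile_keep h1 (by simpa using h.2.2)]
  simp

lemma pv_lstrip_space {ws x : List Char} (h : ∀ c ∈ ws, PySem.Chars.isspace c = true) :
    PySem.Chars.lstrip (ws ++ x) = PySem.Chars.lstrip x := by
  simp only [PySem.Chars.lstrip]
  exact pv_dropWhile_skip h

lemma pv_rstrip_space {x ws : List Char} (h : ∀ c ∈ ws, PySem.Chars.isspace c = true) :
    PySem.Chars.rstrip (x ++ ws) = PySem.Chars.rstrip x := by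
  simp only [PySem.Chars.rstrip, List.reverse_append]
  rw [pv_dropWhile_skip (by intro c hc; exact h c (by simpa using hc))]

lemma pv_dropWhile_id {p : Char → Bool} {l : List Char} (h : ∀ c ∈ l, p c = false) :
    List.dropWhile p l = l := by
  cases l with
  | nil => rfl
  | cons c t => simp [h c (by simp)]

lemma pv_clean_of_good {w : List Char} (h : pvGoodW w) : pvClean w := by
  refine ⟨?_, ?_, h.1⟩
  · simp only [PySem.Chars.lstrip]
    exact pv_dropWhile_id h.2
  · simp only [PySem.Chars.rstrip]
    rw [pv_dropWhile_id (fun c hc => h.2 c (List.mem_reverse.1 hc))]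
    exact List.reverse_reverse w

lemma pv_clean_sep {a b : List Char} (s : Char) (ha : pvClean a) (hb : pvClean b) :
    pvClean (a ++ s :: b) := by
  refine ⟨?_, ?_, by simp⟩
  · exact pv_lstrip_clean_append ha
  · have : a ++ s :: b = (a ++ [s]) ++ b := by simp
    rw [this, pv_rstrip_clean_append hb]

lemma pv_clean_join {sep : Char} {L : List (List Char)}
    (h : ∀ g ∈ L, pvClean g) (hne : L ≠ []) :
    pvClean (PySem.Chars.join [sep] L) := by
  induction L with
  | nil => exact absurd rfl hne
  | cons g rest ih =>
    cases rest with
    | nil => rw [PySem.Chars.join_singleton]; exact h g (by simp)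
    | cons g' rest' =>
      rw [PySem.Chars.join_cons_cons]
      have : g ++ [sep] ++ PySem.Chars.join [sep] (g' :: rest') =
          g ++ sep :: PySem.Chars.join [sep] (g' :: rest') := by simp
      rw [this]
      exact pv_clean_sep sep (h g (by simp))
        (ih (by intro x hx; exact h x (by simp [hx])) (by simp))

lemma pv_join_snoc {sep : List Char} {L : List (List Char)} {g : List Char} (h : L ≠ []) :
    PySem.Chars.join sep (L ++ [g]) = PySem.Chars.join sep L ++ sep ++ g := by
  induction L with
  | nil => exact absurd rfl h
  | cons a rest ih =>
    cases rest with
    | nil => simp [PySem.Chars.join_cons_cons, PySem.Chars.join_singleton]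
    | cons a' rest' =>
      rw [show (a :: a' :: rest') ++ [g] = a :: (a' :: (rest' ++ [g])) by simp,
        PySem.Chars.join_cons_cons,
        show a' :: (rest' ++ [g]) = (a' :: rest') ++ [g] by simp,
        ih (by simp), PySem.Chars.join_cons_cons]
      simp

lemma pv_strip_encode {L : List (List Char)} (hL : ∀ g ∈ L, pvClean g) :
    PySem.Chars.strip (PySem.Chars.join ['\n'] L ++ ['\n']) = PySem.Chars.join ['\n'] L := by
  cases L with
  | nil => decide
  | cons a rest =>
    have hc := pv_clean_join (sep := '\n') (L := a :: rest) hL (by simp)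
    simp only [PySem.Chars.strip]
    rw [pv_lstrip_clean_append hc, pv_rstrip_space (by intro c hc'; simp at hc'; subst hc'; decide)]
    exact hc.2.1

lemma pv_strip_group {g : List Char} (hg : pvClean g) :
    PySem.Chars.strip (g ++ [' ']) = g := by
  simp only [PySem.Chars.strip]
  rw [pv_lstrip_clean_append hg, pv_rstrip_space (by intro c hc; simp at hc; subst hc; decide)]
  exact hg.2.1

lemma pv_strip_encode_group {L : List (List Char)} {g : List Char}
    (hL : ∀ g' ∈ L, pvClean g') (hg : pvClean g) :
    PySem.Chars.strip ((PySem.Chars.join ['\n'] L ++ ['\n']) ++ (g ++ [' '])) =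
      PySem.Chars.join ['\n'] (L ++ [g]) := by
  cases L with
  | nil =>
    simp only [PySem.Chars.join_nil, List.nil_append, PySem.Chars.join_singleton,
      PySem.Chars.strip]
    rw [pv_lstrip_space (ws := ['\n']) (by intro c hc; simp at hc; subst hc; decide),
      pv_lstrip_clean_append hg,
      pv_rstrip_space (by intro c hc; simp at hc; subst hc; decide)]
    exact hg.2.1
  | cons a rest =>
    have hc := pv_clean_join (sep := '\n') (L := a :: rest) hL (by simp)
    have hsnoc := pv_join_snoc (sep := ['\n']) (g := g) (L := a :: rest) (by simp)
    simp only [PySem.Chars.strip]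
    rw [show (PySem.Chars.join ['\n'] (a :: rest) ++ ['\n']) ++ (g ++ [' ']) =
        PySem.Chars.join ['\n'] (a :: rest) ++ (['\n'] ++ g ++ [' ']) by simp,
      pv_lstrip_clean_append hc,
      show PySem.Chars.join ['\n'] (a :: rest) ++ (['\n'] ++ g ++ [' ']) =
        ((PySem.Chars.join ['\n'] (a :: rest) ++ ['\n']) ++ g) ++ [' '] by simp,
      pv_rstrip_space (by intro c hc'; simp at hc'; subst hc'; decide),
      pv_rstrip_clean_append hg, hsnoc]

lemma pv_split0_go_good : ∀ (s cur acc : _),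
    (∀ c ∈ cur, PySem.Chars.isspace c = false) → (∀ w ∈ acc, pvGoodW w) →
    ∀ w ∈ PySem.Chars.split₀.go s cur acc, pvGoodW w := by
  intro s
  induction s with
  | nil =>
    intro cur acc hcur hacc w hw
    by_cases hc : cur.isEmpty
    · simp only [PySem.Chars.split₀.go, hc, if_true, List.mem_reverse] at hw
      exact hacc w hw
    · simp only [PySem.Chars.split₀.go, hc, Bool.false_eq_true, if_false,
        List.mem_reverse, List.mem_cons] at hw
      rcases hw with h | h
      · subst h
        refine ⟨by simpa [List.isEmpty_iff] using hc, ?_⟩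
        intro c hcm; exact hcur c (List.mem_reverse.1 hcm)
      · exact hacc w h
  | cons c rest ih =>
    intro cur acc hcur hacc w hw
    by_cases hsp : PySem.Chars.isspace c
    · by_cases hc : cur.isEmpty
      · simp only [PySem.Chars.split₀.go, hsp, hc, if_true] at hw
        exact ih [] acc (by simp) hacc w hw
      · simp only [PySem.Chars.split₀.go, hsp, hc, Bool.false_eq_true, if_true, if_false] at hw
        refine ih [] (cur.reverse :: acc) (by simp) ?_ w hw
        intro x hx
        rcases List.mem_cons.1 hx with h | h
        · subst h
          refine ⟨by simpa [List.isEmpty_iff] using hc, ?_⟩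
          intro y hy; exact hcur y (List.mem_reverse.1 hy)
        · exact hacc x h
    · simp only [PySem.Chars.split₀.go, hsp, Bool.false_eq_true, if_false] at hw
      refine ih (c :: cur) acc ?_ hacc w hw
      intro x hx
      rcases List.mem_cons.1 hx with h | h
      · subst h; simpa using hsp
      · exact hcur x h

lemma pv_split0_good (s : List Char) : ∀ w ∈ PySem.Chars.split₀ s, pvGoodW w := by
  intro w hw
  exact pv_split0_go_good s [] [] (by simp) (by simp) w hw

lemma pv_aInner_eq (maxw : Int) : ∀ (ws : List (List Char)) (wc : Int) (acc : List Char),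
    pvAInner maxw ws wc acc =
      (wc + (((ws.take (maxw - wc).toNat).length : Nat) : Int),
       acc ++ (ws.take (maxw - wc).toNat).flatMap (fun w => w ++ [' '])) := by
  intro ws
  induction ws with
  | nil => intro wc acc; simp [pvAInner]
  | cons w rest ih =>
    intro wc acc
    by_cases h : wc < maxw
    · have hn : (maxw - wc).toNat = (maxw - (wc + 1)).toNat + 1 := by omega
      rw [show pvAInner maxw (w :: rest) wc acc =
          pvAInner maxw rest (wc + 1) (acc ++ w ++ [' ']) by simp [pvAInner, h], ih, hn]
      simp only [List.take_succ_cons, List.flatMap_cons, List.length_cons, Prod.mk.injEq]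
      refine ⟨by push_cast; ring, by simp⟩
    · have hn : (maxw - wc).toNat = 0 := by omega
      rw [show pvAInner maxw (w :: rest) wc acc = (wc, acc) by simp [pvAInner, h], hn]
      simp

lemma pv_flatMap_words {t : List (List Char)} (h : t ≠ []) :
    t.flatMap (fun w => w ++ [' ']) = PySem.Chars.join [' '] t ++ [' '] := by
  induction t with
  | nil => exact absurd rfl h
  | cons g rest ih =>
    cases rest with
    | nil => simp [PySem.Chars.join_singleton]
    | cons g' rest' =>
      rw [List.flatMap_cons, ih (by simp), PySem.Chars.join_cons_cons]
      simp

lemma pv_bLoop_nonpos {r : Int} {lines : List (List Char)} (h : r ≤ 0) :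
    pvBLoop r lines = [] := by
  cases lines <;> simp [pvBLoop, h]

lemma pv_main (lines : List (List Char)) : ∀ (L : List (List Char)) (wc maxw : Int) (acc : List Char),
    (∀ g ∈ L, pvClean g) → wc < maxw →
    (acc = [] ∧ L = [] ∨ acc = PySem.Chars.join ['\n'] L ++ ['\n']) →
    PySem.Chars.strip (pvALoop maxw lines wc acc) =
      PySem.Chars.join ['\n'] (L ++ pvBLoop (maxw - wc) lines) := by
  induction lines with
  | nil =>
    intro L wc maxw acc hL _ hacc
    simp only [pvALoop, pvBLoop, List.append_nil]
    rcases hacc with ⟨h1, h2⟩ | h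
    · subst h1; subst h2; rfl
    · subst h; exact pv_strip_encode hL
  | cons line rest ih =>
    intro L wc maxw acc hL hwc hacc
    have hgood := pv_split0_good line
    have hr : 0 < maxw - wc := by omega
    simp only [pvALoop, pv_aInner_eq]
    rcases hwords : PySem.Chars.split₀ line with _ | ⟨w, ws⟩
    · -- blank line: no words, A re-strips and appends '\n', B skips the line
      simp only [List.take_nil, List.length_nil, List.flatMap_nil, List.append_nil,
        Nat.cast_zero, add_zero]
      rw [if_neg (by omega)]
      have hstrip : PySem.Chars.strip acc = PySem.Chars.join ['\n'] L := by
        rcases hacc with ⟨h1, h2⟩ | h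
        · subst h1; subst h2; rfl
        · subst h; exact pv_strip_encode hL
      rw [hstrip, ih L wc maxw _ hL hwc (Or.inr rfl)]
      rw [show pvBLoop (maxw - wc) (line :: rest) = pvBLoop (maxw - wc) rest by
        simp [pvBLoop, hwords, not_le.2 hr]]
    · -- line with words
      set words := w :: ws with hwdef
      set t := words.take (maxw - wc).toNat with htdef
      have htne : t ≠ [] := by
        rw [htdef, hwdef]
        cases hn : (maxw - wc).toNat with
        | zero => omega
        | succ k => simp
      have htgood : ∀ x ∈ t, pvClean x := by
        intro x hx
        exact pv_clean_of_good (by rw [hwords] at hgood; exact hgood x (List.mem_of_mem_take hx))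
      set g := PySem.Chars.join [' '] t with hgdef
      have hgClean : pvClean g := pv_clean_join htgood htne
      have hflat : t.flatMap (fun w => w ++ [' ']) = g ++ [' '] := pv_flatMap_words htne
      have htlen : t.length = min (maxw - wc).toNat words.length := by
        rw [htdef]; exact List.length_take ..
      have hstripAcc : PySem.Chars.strip (acc ++ (g ++ [' '])) =
          PySem.Chars.join ['\n'] (L ++ [g]) := by
        rcases hacc with ⟨h1, h2⟩ | h
        · subst h1; subst h2
          simpa [PySem.Chars.join_singleton] using pv_strip_group hgClean
        · subst h; exact pv_strip_encode_group hL hgClean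
      have hslice : PySem.List.slice words none (some (maxw - wc)) = t := by
        rw [PySem.List.slice_to words (le_of_lt hr), htdef]
      have hsw : PySem.Chars.split₀ line = words := by rw [hwords, hwdef]
      have hwE : words.isEmpty = false := by rw [hwdef]; rfl
      by_cases hbrk : maxw ≤ wc + (t.length : Int)
      · -- A breaks: the budget is exhausted on this line
        rw [if_pos hbrk, hflat, hstripAcc]
        rw [show pvBLoop (maxw - wc) (line :: rest) = [g] by
          by_cases hcut : t.length < words.length
          · simp only [pvBLoop, if_neg (not_le.2 hr), hsw, hwE, Bool.false_eq_true, if_false,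
              hslice, if_pos hcut, ← hgdef]
          · simp only [pvBLoop, if_neg (not_le.2 hr), hsw, hwE, Bool.false_eq_true, if_false,
              hslice, if_neg hcut, ← hgdef]
            rw [pv_bLoop_nonpos (r := maxw - wc - (t.length : Int)) (by omega)]]
      · -- A continues to the next line
        rw [if_neg hbrk, hflat, hstripAcc]
        have hLg : ∀ x ∈ L ++ [g], pvClean x := by
          intro x hx
          rcases List.mem_append.1 hx with h | h
          · exact hL x h
          · simp at h; subst h; exact hgClean
        rw [ih (L ++ [g]) (wc + (t.length : Int)) maxw _ hLg (by omega) (Or.inr rfl)]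
        have hfull : ¬ t.length < words.length := by
          have : (t.length : Int) < maxw - wc := by omega
          rw [htlen] at this ⊢; omega
        rw [show pvBLoop (maxw - wc) (line :: rest) =
            g :: pvBLoop (maxw - wc - (t.length : Int)) rest by
          simp only [pvBLoop, if_neg (not_le.2 hr), hsw, hwE, Bool.false_eq_true, if_false,
            hslice, if_neg hfull, ← hgdef]]
        rw [show maxw - (wc + (t.length : Int)) = maxw - wc - (t.length : Int) by ring]
        exact congrArg (PySem.Chars.join ['\n']) (by simp)

-- ===== VERDICT (by name: the statement is the Claim_ definition above) =====
theorem limit_word_count_preserve_newline_spec : Claim_equal_limit_word_count_preserve_newline := by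
  intro input_string max_word_count _
  unfold Spec_limit_word_count_preserve_newline
  unfold limit_word_count_preserve_newline limit_word_count_preserve_newline_alt
  apply congrArg String.mk
  by_cases hm : 0 < max_word_count
  · have := pv_main (PySem.Chars.splitOn input_string.toList ['\n']) [] 0 max_word_count []
      (by simp) (by omega) (Or.inl ⟨rfl, rfl⟩)
    simpa using this
  · rw [pv_bLoop_nonpos (r := max_word_count) (by omega), PySem.Chars.join_nil]
    rcases hlines : PySem.Chars.splitOn input_string.toList ['\n'] with _ | ⟨line, rest⟩
    · rfl
    · simp only [pvALoop, pv_aInner_eq]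
      rw [show (max_word_count - 0).toNat = 0 by omega]
      simp only [List.take_zero, List.length_nil, List.flatMap_nil, List.append_nil,
        Nat.cast_zero, add_zero]
      rw [if_pos (by omega)]
      rfl
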